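-- pv_equiv track=rewrite | github.com/dharm2112/meta | grader/grader.py | _extract_detected_issues
-- ===== SOURCE A (Python) =====
-- from typing import Any, Dict, List
--
-- def _extract_detected_issues(
--     actions: List[Dict[str, Any]],
--     expected: List[str],
-- ) -> List[str]:
--     """Parse comment actions to find which expected issues were mentioned."""
--     detected: List[str] = []
--     for a in actions:
--         if a.get("action_type") != "comment_issue":
--             continue
--         comment = (a.get("comment") or "").lower()
--         for issue in expected:
--             if issue in comment and issue not in detected:
--                 detected.append(issue)
--     return detected
-- ===== SOURCE B (Python) =====
-- from typing import Any, Dict, List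
--
-- def _extract_detected_issues(
--     actions: List[Dict[str, Any]],
--     expected: List[str],
-- ) -> List[str]:
--     """Scan each comment against only the still-undetected issues, shrinking the candidate list."""
--     remaining = list(dict.fromkeys(expected))
--     detected: List[str] = []
--     for a in actions:
--         if not remaining:
--             break
--         if a.get("action_type") != "comment_issue":
--             continue
--         comment = (a.get("comment") or "").lower()
--         hits = [iss for iss in remaining if iss in comment]
--         if hits:
--             detected += hits
--             remaining = [iss for iss in remaining if iss not in hits]
--     return detected
-- ===== Notes on version B (the rewrite author's own statement) =====
-- stated objective: alternative
-- what changed: B dedups the expected list once and keeps a shrinking `remaining` list of still-undetected issues, scanning each comment only against those (removing matches, with early exit once all are found) instead of A's rescan of the full expected list plus a membership scan of `detected` per comment; it trades A's detected-membership checks for maintaining the remaining list.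
import Mathlib
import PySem

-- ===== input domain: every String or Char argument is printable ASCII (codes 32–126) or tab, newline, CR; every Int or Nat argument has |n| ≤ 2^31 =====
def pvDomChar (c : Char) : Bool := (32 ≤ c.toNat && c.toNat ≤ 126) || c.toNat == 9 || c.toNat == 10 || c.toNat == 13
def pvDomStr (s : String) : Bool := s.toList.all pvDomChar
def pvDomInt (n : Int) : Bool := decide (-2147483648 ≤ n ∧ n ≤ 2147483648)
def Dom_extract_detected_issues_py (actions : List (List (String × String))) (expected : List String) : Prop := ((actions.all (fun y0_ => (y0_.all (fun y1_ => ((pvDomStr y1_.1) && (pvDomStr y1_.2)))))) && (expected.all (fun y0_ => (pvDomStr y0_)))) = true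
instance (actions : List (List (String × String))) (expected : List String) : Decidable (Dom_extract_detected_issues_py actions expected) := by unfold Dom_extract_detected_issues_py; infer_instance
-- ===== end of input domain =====

-- B scans each comment against only the still-undetected expected issues (a shrinking candidate
-- list, dedup'd up front, with early exit once everything is found) instead of rescanning the
-- whole expected list and the detected list per comment; objective: alternative.

-- ===== PORT A =====
-- a.get(k): first-match lookup in the association list (exact for a Python dict, whose keys are unique)
def pvGet (a : List (String × String)) (k : String) : Option String :=
  (a.find? (fun p => p.1 == k)).map (·.2)

def extract_detected_issues_py (actions : List (List (String × String))) (expected : List String) : List String :=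
  actions.foldl (fun detected a =>
    if pvGet a "action_type" ≠ some "comment_issue" then detected
    else
      -- '(a.get("comment") or "")': None → ""; a falsy str is already "" itself
      let comment := PySem.Str.lower ((pvGet a "comment").getD "")
      expected.foldl (fun det issue =>
        if PySem.Str.isIn issue comment && !(det.contains issue) then det ++ [issue] else det)
        detected) []

-- ===== PORT B =====
def pvAltGo (actions : List (List (String × String))) (remaining detected : List String) : List String :=
  match actions with
  | [] => detected
  | a :: rest =>
    if remaining.isEmpty then detected                        -- break
    else if pvGet a "action_type" ≠ some "comment_issue" then pvAltGo rest remaining detected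
    else
      let comment := PySem.Str.lower ((pvGet a "comment").getD "")
      let hits := remaining.filter (fun iss => PySem.Str.isIn iss comment)
      if hits.isEmpty then pvAltGo rest remaining detected
      else pvAltGo rest (remaining.filter (fun iss => !(hits.contains iss))) (detected ++ hits)

def extract_detected_issues_py_alt (actions : List (List (String × String))) (expected : List String) : List String :=
  pvAltGo actions (PySem.List.dedup expected) []

-- ===== PRECONDITION & SPEC =====
def Spec_extract_detected_issues_py (actions : List (List (String × String))) (expected : List String) (out : List String) : Prop := out = extract_detected_issues_py_alt actions expected
instance (actions : List (List (String × String))) (expected : List String) (out : List String) : Decidable (Spec_extract_detected_issues_py actions expected out) := by unfold Spec_extract_detected_issues_py; infer_instance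

-- ===== CLAIM (what is proved, stated in full; the proofs are below) =====
def Claim_equal_extract_detected_issues_py : Prop := ∀ (actions : List (List (String × String))) (expected : List String), Dom_extract_detected_issues_py actions expected → Spec_extract_detected_issues_py actions expected (extract_detected_issues_py actions expected)

-- ===== LEMMAS AND PROOFS =====

-- A's inner loop over `expected` appends exactly the not-yet-detected distinct matching issues, in order.
theorem innerA_eq (c : String) : ∀ (l det : List String),
    l.foldl (fun det issue =>
        if PySem.Str.isIn issue c && !(det.contains issue) then det ++ [issue] else det) det
      = det ++ (PySem.Set.ofList l).filter
          (fun i => PySem.Str.isIn i c && !(det.contains i)) := by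
  intro l
  induction l with
  | nil => intro det; simp [PySem.Set.ofList]
  | cons x xs ih =>
    intro det
    rw [PySem.Set.ofList_cons]
    simp only [List.foldl_cons, List.filter_cons]
    by_cases hx : (PySem.Str.isIn x c && !(det.contains x)) = true
    · rw [if_pos hx, if_pos hx, ih]
      simp only [PySem.Set.discard, List.filter_filter, List.append_assoc, List.singleton_append]
      congr 1
      congr 1
      apply List.filter_congr
      intro z _
      simp only [List.contains_append, List.contains_cons, List.contains_nil]
      cases h1 : PySem.Str.isIn z c <;> cases h2 : det.contains z <;>
        cases h3 : z == x <;> simp_all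
    · rw [if_neg hx, if_neg hx, ih]
      simp only [PySem.Set.discard, List.filter_filter]
      congr 1
      apply List.filter_congr
      intro z _
      cases h3 : z == x
      · simp
      · have : z = x := by simpa using h3
        subst this
        simp_all

-- Once every expected issue is detected, A's remaining outer iterations change nothing.
theorem outerA_fixed (expected : List String)
    (det : List String)
    (hfix : (PySem.Set.ofList expected).filter (fun i => !(det.contains i)) = []) :
    ∀ (actions : List (List (String × String))),
      actions.foldl (fun detected a =>
        if pvGet a "action_type" ≠ some "comment_issue" then detected
        else
          let comment := PySem.Str.lower ((pvGet a "comment").getD "")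
          expected.foldl (fun det issue =>
            if PySem.Str.isIn issue comment && !(det.contains issue) then det ++ [issue] else det)
            detected) det = det := by
  intro actions
  induction actions with
  | nil => rfl
  | cons a rest ih =>
    simp only [List.foldl_cons]
    have hstep : ∀ (c : String),
        expected.foldl (fun det issue =>
          if PySem.Str.isIn issue c && !(det.contains issue) then det ++ [issue] else det) det = det := by
      intro c
      rw [innerA_eq]
      have : (PySem.Set.ofList expected).filter (fun i => PySem.Str.isIn i c && !(det.contains i)) = [] := by
        rw [← List.filter_filter]
        rw [hfix]
        rfl
      rw [this, List.append_nil]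
    by_cases h : pvGet a "action_type" ≠ some "comment_issue"
    · rw [if_pos h]; exact ih
    · rw [if_neg h]
      simp only [hstep]
      exact ih

-- Main simulation: B's state (remaining, detected) with remaining = the undetected part of dedup(expected).
theorem sim (expected : List String) : ∀ (actions : List (List (String × String))) (det : List String),
    pvAltGo actions ((PySem.Set.ofList expected).filter (fun i => !(det.contains i))) det
      = actions.foldl (fun detected a =>
          if pvGet a "action_type" ≠ some "comment_issue" then detected
          else
            let comment := PySem.Str.lower ((pvGet a "comment").getD "")
            expected.foldl (fun det issue =>
              if PySem.Str.isIn issue comment && !(det.contains issue) then det ++ [issue] else det)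
              detected) det := by
  intro actions
  induction actions with
  | nil => intro det; rfl
  | cons a rest ih =>
    intro det
    set R := (PySem.Set.ofList expected).filter (fun i => !(det.contains i)) with hR
    rw [pvAltGo]
    by_cases hempty : R.isEmpty
    · rw [if_pos hempty]
      have hfix : R = [] := List.isEmpty_iff.mp hempty
      exact (outerA_fixed expected det (hR ▸ hfix) (a :: rest)).symm
    · rw [if_neg hempty]
      simp only [List.foldl_cons]
      by_cases hact : pvGet a "action_type" ≠ some "comment_issue"
      · rw [if_pos hact, if_pos hact]
        exact ih det
      · rw [if_neg hact, if_neg hact]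
        set c := PySem.Str.lower ((pvGet a "comment").getD "") with hc
        have hinner := innerA_eq c expected det
        have hhits : R.filter (fun iss => PySem.Str.isIn iss c)
            = (PySem.Set.ofList expected).filter (fun i => PySem.Str.isIn i c && !(det.contains i)) := by
          rw [hR, List.filter_filter]
        by_cases hh : (R.filter (fun iss => PySem.Str.isIn iss c)).isEmpty
        · rw [if_pos hh]
          have h0 : (PySem.Set.ofList expected).filter (fun i => PySem.Str.isIn i c && !(det.contains i)) = [] := by
            rw [← hhits]; exact List.isEmpty_iff.mp hh
          simp only [hinner, h0, List.append_nil]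
          exact ih det
        · rw [if_neg hh]
          set hits := R.filter (fun iss => PySem.Str.isIn iss c) with hhitsdef
          have hrem : R.filter (fun iss => !(hits.contains iss))
              = (PySem.Set.ofList expected).filter (fun i => !((det ++ hits).contains i)) := by
            rw [hR, List.filter_filter]
            apply List.filter_congr
            intro z _
            simp only [List.contains_append]
            cases h1 : hits.contains z <;> cases h2 : det.contains z <;> simp_all
          rw [hinner, ← hhits, hrem]
          exact ih (det ++ hits)

-- ===== VERDICT (by name: the statement is the Claim_ definition above) =====
theorem extract_detected_issues_py_spec : Claim_equal_extract_detected_issues_py := by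
  intro actions expected _
  unfold Spec_extract_detected_issues_py extract_detected_issues_py extract_detected_issues_py_alt
  have := sim expected actions []
  simp only [List.contains_nil, Bool.not_false, List.filter_true] at this
  rw [PySem.List.dedup, ← this]
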